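-- pv_equiv track=rewrite | github.com/luornor/A2SV | XSum.py | xSum
-- ===== SOURCE A (Python) =====
-- def xSum(board):
--     max_sum = 0
--     row = len(board) # rows
--     col = len(board[0]) #cols
--     # For each cell at position (i, j),
--     # calculate the sum of all cells attacked by a bishop placed at that position.
--     # sum_attacked = 0
--     for i in range(row):
--         for j in range(col):
--              # the value of the current cell
--             sum_attacked = board[i][j]
--             # check up-left diagonal
--             x,y = i,j
--             while x>0 and y>0:
--                 x-=1
--                 y-=1
--                 sum_attacked+=board[x][y]
--
--             #check up-right diagonal
--             x,y = i, j
--             while x>0 and y<col-1: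
--                 x-=1
--                 y+=1
--                 sum_attacked+=board[x][y]
--
--             #check down-left diagonal
--             x,y = i, j
--             while x<row-1 and y>0:
--                 x+=1
--                 y-=1
--                 sum_attacked+=board[x][y]
--
--             #check down-right diagonal
--             x,y = i, j
--             while x<row-1 and y<col-1:
--                 x+=1
--                 y+=1
--                 sum_attacked+= board[x][y]
--
--
--             max_sum = max(max_sum,sum_attacked)
--     return max_sum
-- ===== SOURCE B (Python) =====
-- def xSum(board):
--     rows = len(board)
--     cols = len(board[0])
--     # accumulate the sum of every main diagonal (key i-j, shifted) and anti diagonal (key i+j)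
--     diag = [0] * (rows + cols - 1)
--     anti = [0] * (rows + cols - 1)
--     for i in range(rows):
--         for j in range(cols):
--             v = board[i][j]
--             diag[i - j + cols - 1] += v
--             anti[i + j] += v
--     best = 0
--     for i in range(rows):
--         for j in range(cols):
--             best = max(best, diag[i - j + cols - 1] + anti[i + j] - board[i][j])
--     return best
-- ===== Notes on version B (the rewrite author's own statement) =====
-- stated objective: faster
-- what changed: B accumulates the sum of every main diagonal (key i-j) and every anti diagonal (key i+j) in two tables in one pass, then each cell's bishop sum is diag[i-j]+anti[i+j]-board[i][j], replacing A's four per-cell diagonal walks; O(R*C) instead of O(R*C*(R+C)).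
import Mathlib
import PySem

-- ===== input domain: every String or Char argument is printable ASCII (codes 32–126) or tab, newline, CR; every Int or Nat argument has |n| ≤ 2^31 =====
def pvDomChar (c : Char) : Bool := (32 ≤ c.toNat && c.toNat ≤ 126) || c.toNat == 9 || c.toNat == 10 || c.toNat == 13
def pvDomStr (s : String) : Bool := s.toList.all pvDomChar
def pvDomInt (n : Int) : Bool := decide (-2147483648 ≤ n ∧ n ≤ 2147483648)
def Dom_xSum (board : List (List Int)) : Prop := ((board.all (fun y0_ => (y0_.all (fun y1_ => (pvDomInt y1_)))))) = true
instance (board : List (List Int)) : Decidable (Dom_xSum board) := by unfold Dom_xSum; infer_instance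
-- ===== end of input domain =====

-- B replaces A's four per-cell diagonal walks by two per-diagonal sum tables filled in one pass.

-- ===== PORT A =====
-- board[i][j]; exact here: both ports only use it with nonnegative indices that are
-- in range under Pre_xSum (i < len(board), j < len(board[0]) <= len(board[i])).
def pvGet (b : List (List Int)) (i j : Nat) : Int := (b.getD i []).getD j 0

-- while x>0 and y>0: x-=1; y-=1; sum += board[x][y]
def rayUL (b : List (List Int)) : Nat → Nat → Int
  | x + 1, y + 1 => pvGet b x y + rayUL b x y
  | _, _ => 0

-- while x>0 and y<col-1: x-=1; y+=1; sum += board[x][y]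
def rayUR (b : List (List Int)) (cols : Nat) : Nat → Nat → Int
  | x + 1, y => if y < cols - 1 then pvGet b x (y + 1) + rayUR b cols x (y + 1) else 0
  | 0, _ => 0

-- while x<row-1 and y>0: x+=1; y-=1; sum += board[x][y]
def rayDL (b : List (List Int)) (rows : Nat) : Nat → Nat → Int
  | x, y + 1 => if x < rows - 1 then pvGet b (x + 1) y + rayDL b rows (x + 1) y else 0
  | _, 0 => 0

-- while x<row-1 and y<col-1: x+=1; y+=1; sum += board[x][y]
def rayDR (b : List (List Int)) (rows cols : Nat) (x y : Nat) : Int :=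
  if x < rows - 1 ∧ y < cols - 1 then pvGet b (x + 1) (y + 1) + rayDR b rows cols (x + 1) (y + 1) else 0
termination_by rows - 1 - x
decreasing_by omega

def xSum (board : List (List Int)) : Int :=
  let rows := board.length
  let cols := (board.headD []).length
  (List.range rows).foldl (fun m i =>
    (List.range cols).foldl (fun m j =>
      max m (pvGet board i j + rayUL board i j + rayUR board cols i j
             + rayDL board rows i j + rayDR board rows cols i j)) m) 0

-- ===== PORT B =====
-- t[k] += v  (k always in range in B: 0 <= i-j+cols-1 < rows+cols-1 and 0 <= i+j < rows+cols-1)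
def bump (t : List Int) (k : Int) (v : Int) : List Int :=
  PySem.List.pySetD t k (PySem.List.pyGetD t k 0 + v)

def xSum_alt (board : List (List Int)) : Int :=
  let rows := board.length
  let cols := (board.headD []).length
  let init := PySem.List.pyRepeat [(0 : Int)] ((rows : Int) + (cols : Int) - 1)
  let tabs := (List.range rows).foldl (fun st (i : Nat) =>
      (List.range cols).foldl (fun st (j : Nat) =>
        (bump st.1 ((i : Int) - (j : Int) + (cols : Int) - 1) (pvGet board i j),
         bump st.2 ((i : Int) + (j : Int)) (pvGet board i j))) st) (init, init)
  (List.range rows).foldl (fun best (i : Nat) =>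
    (List.range cols).foldl (fun best (j : Nat) =>
      max best (PySem.List.pyGetD tabs.1 ((i : Int) - (j : Int) + (cols : Int) - 1) 0
                + PySem.List.pyGetD tabs.2 ((i : Int) + (j : Int)) 0
                - pvGet board i j)) best) 0

-- ===== PRECONDITION & SPEC =====
-- Exactly where the Python A returns: on an empty board it raises IndexError (at board[0]),
-- and if some row is shorter than row 0 it raises IndexError at board[i][j] for j < len(board[0]).
def Pre_xSum (board : List (List Int)) : Prop :=
  board ≠ [] ∧ ∀ r ∈ board, (board.headD []).length ≤ r.length

instance (board : List (List Int)) : Decidable (Pre_xSum board) := by unfold Pre_xSum; infer_instance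

def pvWitness_xSum : List (List Int) := [[1, 2], [3, 4]]

def Spec_xSum (board : List (List Int)) (out : Int) : Prop := out = xSum_alt board
instance (board : List (List Int)) (out : Int) : Decidable (Spec_xSum board out) := by unfold Spec_xSum; infer_instance

-- ===== CLAIM (what is proved, stated in full; the proofs are below) =====
def Claim_equal_xSum : Prop := ∀ (board : List (List Int)), Dom_xSum board → Pre_xSum board → Spec_xSum board (xSum board)

-- ===== LEMMAS AND PROOFS =====

-- sum along the main diagonal with offset d (cells (t, t-d)) / the anti diagonal s (cells (t, s-t))
def dterm (b : List (List Int)) (cols : Nat) (d : Int) (t : Nat) : Int :=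
  if 0 ≤ (t : Int) - d ∧ (t : Int) - d < (cols : Int) then pvGet b t ((t : Int) - d).toNat else 0

def aterm (b : List (List Int)) (cols : Nat) (s : Int) (t : Nat) : Int :=
  if 0 ≤ s - (t : Int) ∧ s - (t : Int) < (cols : Int) then pvGet b t (s - (t : Int)).toNat else 0

def dsum (b : List (List Int)) (rows cols : Nat) (d : Int) : Int :=
  ((List.range rows).map (dterm b cols d)).sum

def asum (b : List (List Int)) (rows cols : Nat) (s : Int) : Int :=
  ((List.range rows).map (aterm b cols s)).sum

theorem dterm_hit (b : List (List Int)) (cols : Nat) (d : Int) (t k : Nat)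
    (h : (t : Int) - d = (k : Int)) (hk : k < cols) : dterm b cols d t = pvGet b t k := by
  unfold dterm
  rw [if_pos ⟨by omega, by omega⟩]
  congr 1
  omega

theorem dterm_miss (b : List (List Int)) (cols : Nat) (d : Int) (t : Nat)
    (h : (t : Int) - d < 0 ∨ (cols : Int) ≤ (t : Int) - d) : dterm b cols d t = 0 := by
  unfold dterm
  rw [if_neg (by omega)]

theorem aterm_hit (b : List (List Int)) (cols : Nat) (s : Int) (t k : Nat)
    (h : s - (t : Int) = (k : Int)) (hk : k < cols) : aterm b cols s t = pvGet b t k := by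
  unfold aterm
  rw [if_pos ⟨by omega, by omega⟩]
  congr 1
  omega

theorem aterm_miss (b : List (List Int)) (cols : Nat) (s : Int) (t : Nat)
    (h : s - (t : Int) < 0 ∨ (cols : Int) ≤ s - (t : Int)) : aterm b cols s t = 0 := by
  unfold aterm
  rw [if_neg (by omega)]

theorem ul_sum (b : List (List Int)) (cols : Nat) :
    ∀ i j, j < cols →
      ((List.range (i + 1)).map (dterm b cols ((i : Int) - (j : Int)))).sum
        = pvGet b i j + rayUL b i j := by
  intro i
  induction i with
  | zero =>
    intro j hj
    simp only [List.range_succ, List.range_zero, List.nil_append, List.map_cons, List.map_nil,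
      List.sum_cons, List.sum_nil]
    rw [dterm_hit b cols _ 0 j (by omega) hj]
    simp [rayUL]
  | succ i ih =>
    intro j hj
    rw [List.range_succ, List.map_append, List.sum_append]
    cases j with
    | zero =>
      have hz : ∀ x ∈ (List.range (i + 1)).map (dterm b cols (((i + 1 : Nat) : Int) - ((0 : Nat) : Int))), x = 0 := by
        intro x hx
        obtain ⟨t, ht, rfl⟩ := List.mem_map.mp hx
        have ht' := List.mem_range.mp ht
        exact dterm_miss b cols _ t (by omega)
      rw [List.sum_eq_zero hz]
      rw [List.map_singleton, List.sum_cons, List.sum_nil]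
      rw [dterm_hit b cols _ (i + 1) 0 (by push_cast; omega) hj]
      simp [rayUL]
    | succ j' =>
      have hd : (((i + 1 : Nat) : Int) - ((j' + 1 : Nat) : Int)) = ((i : Int) - (j' : Int)) := by push_cast; ring
      rw [hd]
      rw [ih j' (by omega)]
      rw [List.map_singleton, List.sum_cons, List.sum_nil]
      rw [dterm_hit b cols _ (i + 1) (j' + 1) (by push_cast; omega) hj]
      rw [show rayUL b (i + 1) (j' + 1) = pvGet b i j' + rayUL b i j' from rfl]
      ring

theorem dr_sum (b : List (List Int)) (rows cols : Nat) :
    ∀ m i j, m = rows - (i + 1) → i < rows → j < cols →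
      ((List.range m).map (fun k => dterm b cols ((i : Int) - (j : Int)) (i + 1 + k))).sum
        = rayDR b rows cols i j := by
  intro m
  induction m with
  | zero =>
    intro i j hm hi hj
    rw [rayDR, if_neg (by omega)]
    simp
  | succ m ih =>
    intro i j hm hi hj
    rw [rayDR]
    by_cases hjc : j < cols - 1
    · rw [if_pos ⟨by omega, hjc⟩]
      rw [List.range_succ_eq_map, List.map_cons, List.sum_cons, List.map_map]
      have harg : ((fun k => dterm b cols ((i : Int) - (j : Int)) (i + 1 + k)) ∘ Nat.succ)
          = fun k => dterm b cols ((i : Int) - (j : Int)) ((i + 1) + 1 + k) := by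
        funext k
        simp only [Function.comp]
        congr 1
        omega
      rw [harg]
      have hd : ((i : Int) - (j : Int)) = (((i + 1 : Nat) : Int) - ((j + 1 : Nat) : Int)) := by push_cast; ring
      rw [show (i + 1 + 0) = i + 1 from rfl]
      rw [dterm_hit b cols _ (i + 1) (j + 1) (by push_cast; omega) (by omega)]
      rw [hd, ih (i + 1) (j + 1) (by omega) (by omega) (by omega)]
    · rw [if_neg (by omega)]
      apply List.sum_eq_zero
      intro x hx
      obtain ⟨t, ht, rfl⟩ := List.mem_map.mp hx
      exact dterm_miss b cols _ _ (by omega)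

theorem ur_sum (b : List (List Int)) (cols : Nat) :
    ∀ i j, j < cols →
      ((List.range (i + 1)).map (aterm b cols ((i : Int) + (j : Int)))).sum
        = pvGet b i j + rayUR b cols i j := by
  intro i
  induction i with
  | zero =>
    intro j hj
    simp only [List.range_succ, List.range_zero, List.nil_append, List.map_cons, List.map_nil,
      List.sum_cons, List.sum_nil]
    rw [aterm_hit b cols _ 0 j (by omega) hj]
    simp [rayUR]
  | succ i ih =>
    intro j hj
    rw [List.range_succ, List.map_append, List.sum_append, List.map_singleton, List.sum_cons, List.sum_nil]
    rw [show rayUR b cols (i + 1) j = if j < cols - 1 then pvGet b i (j + 1) + rayUR b cols i (j + 1) else 0 from rfl]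
    rw [aterm_hit b cols _ (i + 1) j (by push_cast; omega) hj]
    by_cases hjc : j < cols - 1
    · have hs : (((i + 1 : Nat) : Int) + (j : Int)) = ((i : Int) + ((j + 1 : Nat) : Int)) := by push_cast; ring
      rw [hs, ih (j + 1) (by omega), if_pos hjc]
      ring
    · rw [if_neg hjc]
      have hz : ∀ x ∈ (List.range (i + 1)).map (aterm b cols (((i + 1 : Nat) : Int) + (j : Int))), x = 0 := by
        intro x hx
        obtain ⟨t, ht, rfl⟩ := List.mem_map.mp hx
        have ht' := List.mem_range.mp ht
        exact aterm_miss b cols _ t (by omega)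
      rw [List.sum_eq_zero hz]
      ring

theorem dl_sum (b : List (List Int)) (rows cols : Nat) :
    ∀ m i j, m = rows - (i + 1) → i < rows → j < cols →
      ((List.range m).map (fun k => aterm b cols ((i : Int) + (j : Int)) (i + 1 + k))).sum
        = rayDL b rows i j := by
  intro m
  induction m with
  | zero =>
    intro i j hm hi hj
    have hz : rayDL b rows i j = 0 := by
      cases j with
      | zero => rfl
      | succ j' =>
        rw [show rayDL b rows i (j' + 1) = if i < rows - 1 then pvGet b (i + 1) j' + rayDL b rows (i + 1) j' else 0 from rfl]
        rw [if_neg (by omega)]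
    rw [hz]
    simp
  | succ m ih =>
    intro i j hm hi hj
    cases j with
    | zero =>
      rw [show rayDL b rows i 0 = 0 from rfl]
      apply List.sum_eq_zero
      intro x hx
      obtain ⟨t, ht, rfl⟩ := List.mem_map.mp hx
      exact aterm_miss b cols _ _ (by omega)
    | succ j' =>
      rw [show rayDL b rows i (j' + 1) = if i < rows - 1 then pvGet b (i + 1) j' + rayDL b rows (i + 1) j' else 0 from rfl]
      rw [if_pos (by omega)]
      rw [List.range_succ_eq_map, List.map_cons, List.sum_cons, List.map_map]
      have harg : ((fun k => aterm b cols ((i : Int) + ((j' + 1 : Nat) : Int)) (i + 1 + k)) ∘ Nat.succ)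
          = fun k => aterm b cols ((i : Int) + ((j' + 1 : Nat) : Int)) ((i + 1) + 1 + k) := by
        funext k
        simp only [Function.comp]
        congr 1
        omega
      rw [harg]
      rw [show (i + 1 + 0) = i + 1 from rfl]
      rw [aterm_hit b cols _ (i + 1) j' (by push_cast; omega) (by omega)]
      have hs : ((i : Int) + ((j' + 1 : Nat) : Int)) = (((i + 1 : Nat) : Int) + ((j' : Nat) : Int)) := by push_cast; ring
      rw [hs, ih (i + 1) j' (by omega) (by omega) (by omega)]

theorem dsum_cell (b : List (List Int)) (rows cols i j : Nat) (hi : i < rows) (hj : j < cols) :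
    dsum b rows cols ((i : Int) - (j : Int))
      = pvGet b i j + rayUL b i j + rayDR b rows cols i j := by
  unfold dsum
  have hr : List.range rows = List.range (i + 1) ++ (List.range (rows - (i + 1))).map (fun x => (i + 1) + x) := by
    rw [← List.range_add]
    congr 1
    omega
  rw [hr, List.map_append, List.sum_append, List.map_map]
  rw [ul_sum b cols i j hj]
  rw [show ((dterm b cols ((i : Int) - (j : Int))) ∘ fun x => i + 1 + x)
      = fun k => dterm b cols ((i : Int) - (j : Int)) (i + 1 + k) from rfl]
  rw [dr_sum b rows cols (rows - (i + 1)) i j rfl hi hj]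

theorem asum_cell (b : List (List Int)) (rows cols i j : Nat) (hi : i < rows) (hj : j < cols) :
    asum b rows cols ((i : Int) + (j : Int))
      = pvGet b i j + rayUR b cols i j + rayDL b rows i j := by
  unfold asum
  have hr : List.range rows = List.range (i + 1) ++ (List.range (rows - (i + 1))).map (fun x => (i + 1) + x) := by
    rw [← List.range_add]
    congr 1
    omega
  rw [hr, List.map_append, List.sum_append, List.map_map]
  rw [ur_sum b cols i j hj]
  rw [show ((aterm b cols ((i : Int) + (j : Int))) ∘ fun x => i + 1 + x)
      = fun k => aterm b cols ((i : Int) + (j : Int)) (i + 1 + k) from rfl]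
  rw [dl_sum b rows cols (rows - (i + 1)) i j rfl hi hj]

-- a pair fold with independent components is two folds (PySem.List.foldl_prod_mk with a variable initial pair)
theorem pair_foldl {α β γ : Type} (f : β → α → β) (g : γ → α → γ) (l : List α) (p : β × γ) :
    l.foldl (fun s e => (f s.1 e, g s.2 e)) p = (l.foldl f p.1, l.foldl g p.2) := by
  rw [← Prod.mk.eta (p := p), PySem.List.foldl_prod_mk]

theorem length_bump (t : List Int) (k : Int) (v : Int) : (bump t k v).length = t.length := by
  unfold bump
  exact PySem.List.length_pySetD t k _

theorem bump_getD (t : List Int) (k : Int) (v : Int) (K : Nat)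
    (hk0 : 0 ≤ k) (hk1 : k < (t.length : Int)) :
    PySem.List.pyGetD (bump t k v) (K : Int) 0
      = if (K : Int) = k then PySem.List.pyGetD t (K : Int) 0 + v else PySem.List.pyGetD t (K : Int) 0 := by
  unfold bump
  rw [show k = ((k.toNat : Nat) : Int) from by omega]
  rw [PySem.List.pyGetD_pySetD_natCast t k.toNat K _ 0 (by omega)]
  by_cases h : K = k.toNat
  · rw [if_pos h, if_pos (by omega), h]
  · rw [if_neg h, if_neg (by omega)]

-- one row of bumps: the table gains, at each key, the values written at that key
theorem row_bump (N : Nat) (keyj : Nat → Int) (vj : Nat → Int) :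
    ∀ (c : Nat) (t : List Int), t.length = N → (∀ j, j < c → 0 ≤ keyj j ∧ keyj j < (N : Int)) →
      ((List.range c).foldl (fun t j => bump t (keyj j) (vj j)) t).length = N ∧
      ∀ K : Nat, K < N →
        PySem.List.pyGetD ((List.range c).foldl (fun t j => bump t (keyj j) (vj j)) t) (K : Int) 0
          = PySem.List.pyGetD t (K : Int) 0
            + ((List.range c).map (fun j => if keyj j = (K : Int) then vj j else 0)).sum := by
  intro c
  induction c with
  | zero =>
    intro t hlen hkey
    refine ⟨hlen, fun K hK => ?_⟩
    simp
  | succ c ih =>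
    intro t hlen hkey
    obtain ⟨ihlen, ihget⟩ := ih t hlen (fun j hj => hkey j (by omega))
    rw [List.range_succ, List.foldl_append, List.foldl_cons, List.foldl_nil]
    constructor
    · rw [length_bump, ihlen]
    · intro K hK
      rw [bump_getD _ _ _ K (hkey c (by omega)).1 (by rw [ihlen]; exact_mod_cast (hkey c (by omega)).2)]
      rw [List.map_append, List.sum_append, List.map_singleton, List.sum_cons, List.sum_nil]
      rw [ihget K hK]
      by_cases hc : keyj c = (K : Int)
      · rw [if_pos (by omega), if_pos hc]
        ring
      · rw [if_neg (by omega), if_neg hc]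
        ring

-- the whole nested build: table value at key K = sum of all cell values written at key K
theorem table_getD (b : List (List Int)) (cols N : Nat) (key : Nat → Nat → Int) :
    ∀ (rows : Nat) (t : List Int), t.length = N →
      (∀ i j, i < rows → j < cols → 0 ≤ key i j ∧ key i j < (N : Int)) →
      ((List.range rows).foldl (fun t i => (List.range cols).foldl (fun t j => bump t (key i j) (pvGet b i j)) t) t).length = N ∧
      ∀ K : Nat, K < N →
        PySem.List.pyGetD ((List.range rows).foldl (fun t i => (List.range cols).foldl (fun t j => bump t (key i j) (pvGet b i j)) t) t) (K : Int) 0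
          = PySem.List.pyGetD t (K : Int) 0
            + ((List.range rows).map (fun i => ((List.range cols).map (fun j => if key i j = (K : Int) then pvGet b i j else 0)).sum)).sum := by
  intro rows
  induction rows with
  | zero =>
    intro t hlen hkey
    refine ⟨hlen, fun K hK => ?_⟩
    simp
  | succ rows ih =>
    intro t hlen hkey
    obtain ⟨ihlen, ihget⟩ := ih t hlen (fun i j hi hj => hkey i j (by omega) hj)
    rw [List.range_succ, List.foldl_append, List.foldl_cons, List.foldl_nil]
    obtain ⟨rlen, rget⟩ := row_bump N (key rows) (pvGet b rows) cols _ ihlen (fun j hj => hkey rows j (by omega) hj)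
    constructor
    · exact rlen
    · intro K hK
      rw [rget K hK, ihget K hK, List.map_append, List.sum_append, List.map_singleton,
        List.sum_cons, List.sum_nil]
      ring

-- the row's contribution at key i-j+cols-1 = K is exactly the main-diagonal term dterm (K-(cols-1)) i
theorem dhit_sum (b : List (List Int)) (cols : Nat) (i K : Nat) :
    ((List.range cols).map (fun (j : Nat) => if (i : Int) - (j : Int) + (cols : Int) - 1 = (K : Int) then pvGet b i j else 0)).sum
      = dterm b cols ((K : Int) - ((cols : Int) - 1)) i := by
  by_cases h : 0 ≤ (i : Int) - ((K : Int) - ((cols : Int) - 1)) ∧ (i : Int) - ((K : Int) - ((cols : Int) - 1)) < (cols : Int)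
  · have hj0 : (((i : Int) - ((K : Int) - ((cols : Int) - 1))).toNat : Int) = (i : Int) - ((K : Int) - ((cols : Int) - 1)) := by omega
    set j0 : Nat := ((i : Int) - ((K : Int) - ((cols : Int) - 1))).toNat with hj0def
    have hcond : ∀ j : Nat, ((i : Int) - (j : Int) + (cols : Int) - 1 = (K : Int)) = (j = j0) := by
      intro j
      apply propext
      constructor
      · intro hje; omega
      · intro hje; omega
    have hmap : (List.range cols).map (fun (j : Nat) => if (i : Int) - (j : Int) + (cols : Int) - 1 = (K : Int) then pvGet b i j else 0)
        = (List.range cols).map (fun (j : Nat) => if j = j0 then pvGet b i j else 0) := by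
      apply List.map_congr_left
      intro j _
      simp only [hcond]
    rw [hmap, dterm_hit b cols _ i j0 (by omega) (by omega)]
    have hr : List.range cols = List.range (j0 + 1) ++ (List.range (cols - (j0 + 1))).map (fun x => (j0 + 1) + x) := by
      rw [← List.range_add]
      congr 1
      omega
    rw [hr, List.map_append, List.sum_append, List.map_map, List.range_succ, List.map_append, List.sum_append]
    rw [List.map_singleton, List.sum_cons, List.sum_nil, if_pos rfl]
    rw [List.sum_eq_zero, List.sum_eq_zero]
    · ring
    · intro x hx
      obtain ⟨u, hu, rfl⟩ := List.mem_map.mp hx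
      simp only [Function.comp]
      rw [if_neg (by omega)]
    · intro x hx
      obtain ⟨u, hu, rfl⟩ := List.mem_map.mp hx
      have := List.mem_range.mp hu
      rw [if_neg (by omega)]
  · rw [dterm_miss b cols _ i (by omega)]
    apply List.sum_eq_zero
    intro x hx
    obtain ⟨j, hjm, rfl⟩ := List.mem_map.mp hx
    have hj := List.mem_range.mp hjm
    rw [if_neg (by omega)]

-- the row's contribution at key i+j = K is exactly the anti-diagonal term aterm K i
theorem ahit_sum (b : List (List Int)) (cols : Nat) (i K : Nat) :
    ((List.range cols).map (fun (j : Nat) => if (i : Int) + (j : Int) = (K : Int) then pvGet b i j else 0)).sum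
      = aterm b cols (K : Int) i := by
  by_cases h : 0 ≤ (K : Int) - (i : Int) ∧ (K : Int) - (i : Int) < (cols : Int)
  · set j0 : Nat := ((K : Int) - (i : Int)).toNat with hj0def
    have hcond : ∀ j : Nat, ((i : Int) + (j : Int) = (K : Int)) = (j = j0) := by
      intro j
      apply propext
      constructor
      · intro hje; omega
      · intro hje; omega
    have hmap : (List.range cols).map (fun (j : Nat) => if (i : Int) + (j : Int) = (K : Int) then pvGet b i j else 0)
        = (List.range cols).map (fun (j : Nat) => if j = j0 then pvGet b i j else 0) := by
      apply List.map_congr_left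
      intro j _
      simp only [hcond]
    rw [hmap, aterm_hit b cols _ i j0 (by omega) (by omega)]
    have hr : List.range cols = List.range (j0 + 1) ++ (List.range (cols - (j0 + 1))).map (fun x => (j0 + 1) + x) := by
      rw [← List.range_add]
      congr 1
      omega
    rw [hr, List.map_append, List.sum_append, List.map_map, List.range_succ, List.map_append, List.sum_append]
    rw [List.map_singleton, List.sum_cons, List.sum_nil, if_pos rfl]
    rw [List.sum_eq_zero, List.sum_eq_zero]
    · ring
    · intro x hx
      obtain ⟨u, hu, rfl⟩ := List.mem_map.mp hx
      simp only [Function.comp]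
      rw [if_neg (by omega)]
    · intro x hx
      obtain ⟨u, hu, rfl⟩ := List.mem_map.mp hx
      have := List.mem_range.mp hu
      rw [if_neg (by omega)]
  · rw [aterm_miss b cols _ i (by omega)]
    apply List.sum_eq_zero
    intro x hx
    obtain ⟨j, hjm, rfl⟩ := List.mem_map.mp hx
    have hj := List.mem_range.mp hjm
    rw [if_neg (by omega)]

-- ===== VERDICT (by name: the statement is the Claim_ definition above) =====
theorem xSum_spec : Claim_equal_xSum := by
  intro board _ _
  unfold Spec_xSum xSum xSum_alt
  simp only []
  set b := board with hb
  set rows := board.length with hrows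
  set cols := (board.headD []).length with hcols
  set N : Nat := rows + cols - 1 with hN
  have hinit : PySem.List.pyRepeat [(0 : Int)] ((rows : Int) + (cols : Int) - 1) = List.replicate N (0 : Int) := by
    rw [PySem.List.pyRepeat_singleton]
    congr 1
    omega
  simp only [hinit]
  have hsplit : (List.range rows).foldl (fun st (i : Nat) =>
      (List.range cols).foldl (fun st (j : Nat) =>
        (bump st.1 ((i : Int) - (j : Int) + (cols : Int) - 1) (pvGet b i j),
         bump st.2 ((i : Int) + (j : Int)) (pvGet b i j))) st)
      (List.replicate N (0 : Int), List.replicate N (0 : Int))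
    = ((List.range rows).foldl (fun t (i : Nat) => (List.range cols).foldl (fun t (j : Nat) => bump t ((i : Int) - (j : Int) + (cols : Int) - 1) (pvGet b i j)) t) (List.replicate N (0 : Int)),
       (List.range rows).foldl (fun t (i : Nat) => (List.range cols).foldl (fun t (j : Nat) => bump t ((i : Int) + (j : Int)) (pvGet b i j)) t) (List.replicate N (0 : Int))) := by
    have hinner : ∀ (st : List Int × List Int) (i : Nat),
        (List.range cols).foldl (fun st (j : Nat) =>
          (bump st.1 ((i : Int) - (j : Int) + (cols : Int) - 1) (pvGet b i j),
           bump st.2 ((i : Int) + (j : Int)) (pvGet b i j))) st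
        = ((List.range cols).foldl (fun t (j : Nat) => bump t ((i : Int) - (j : Int) + (cols : Int) - 1) (pvGet b i j)) st.1,
           (List.range cols).foldl (fun t (j : Nat) => bump t ((i : Int) + (j : Int)) (pvGet b i j)) st.2) :=
      fun st i => pair_foldl
        (fun t (j : Nat) => bump t ((i : Int) - (j : Int) + (cols : Int) - 1) (pvGet b i j))
        (fun t (j : Nat) => bump t ((i : Int) + (j : Int)) (pvGet b i j))
        (List.range cols) st
    rw [show (fun st (i : Nat) =>
        (List.range cols).foldl (fun st (j : Nat) =>
          (bump st.1 ((i : Int) - (j : Int) + (cols : Int) - 1) (pvGet b i j),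
           bump st.2 ((i : Int) + (j : Int)) (pvGet b i j))) st)
      = (fun (st : List Int × List Int) (i : Nat) =>
        ((List.range cols).foldl (fun t (j : Nat) => bump t ((i : Int) - (j : Int) + (cols : Int) - 1) (pvGet b i j)) st.1,
         (List.range cols).foldl (fun t (j : Nat) => bump t ((i : Int) + (j : Int)) (pvGet b i j)) st.2))
      from funext fun st => funext fun i => hinner st i]
    exact pair_foldl
      (fun t (i : Nat) => (List.range cols).foldl (fun t (j : Nat) => bump t ((i : Int) - (j : Int) + (cols : Int) - 1) (pvGet b i j)) t)
      (fun t (i : Nat) => (List.range cols).foldl (fun t (j : Nat) => bump t ((i : Int) + (j : Int)) (pvGet b i j)) t)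
      (List.range rows) (List.replicate N (0 : Int), List.replicate N (0 : Int))
  rw [hsplit]
  dsimp only
  have hinitget : ∀ K : Nat, K < N → PySem.List.pyGetD (List.replicate N (0 : Int)) (K : Int) 0 = 0 := by
    intro K hK
    rw [PySem.List.pyGetD_natCast]
    simp [List.getD, hK]
  obtain ⟨_, hdget⟩ := table_getD b cols N (fun i j => (i : Int) - (j : Int) + (cols : Int) - 1)
    rows (List.replicate N (0 : Int)) List.length_replicate
    (fun i j hi hj => ⟨by show (0 : Int) ≤ (i : Int) - (j : Int) + (cols : Int) - 1; omega,
                       by show (i : Int) - (j : Int) + (cols : Int) - 1 < (N : Int); omega⟩)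
  obtain ⟨_, haget⟩ := table_getD b cols N (fun i j => (i : Int) + (j : Int))
    rows (List.replicate N (0 : Int)) List.length_replicate
    (fun i j hi hj => ⟨by show (0 : Int) ≤ (i : Int) + (j : Int); omega,
                       by show (i : Int) + (j : Int) < (N : Int); omega⟩)
  apply PySem.List.foldl_congr_mem'
  intro i him best
  apply PySem.List.foldl_congr_mem'
  intro j hjm best2
  have hi' := List.mem_range.mp him
  have hj' := List.mem_range.mp hjm
  congr 1
  rw [show ((i : Int) - (j : Int) + (cols : Int) - 1) = ((i + (cols - 1) - j : Nat) : Int) from by omega]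
  rw [show ((i : Int) + (j : Int)) = ((i + j : Nat) : Int) from by omega]
  rw [hdget (i + (cols - 1) - j) (by omega), haget (i + j) (by omega)]
  rw [hinitget _ (by omega), hinitget _ (by omega)]
  have hm1 : (List.range rows).map (fun (i' : Nat) => ((List.range cols).map (fun (j' : Nat) => if (i' : Int) - (j' : Int) + (cols : Int) - 1 = ((i + (cols - 1) - j : Nat) : Int) then pvGet b i' j' else 0)).sum)
      = (List.range rows).map (dterm b cols (((i + (cols - 1) - j : Nat) : Int) - ((cols : Int) - 1))) :=
    List.map_congr_left (fun i' _ => dhit_sum b cols i' (i + (cols - 1) - j))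
  have hm2 : (List.range rows).map (fun (i' : Nat) => ((List.range cols).map (fun (j' : Nat) => if (i' : Int) + (j' : Int) = ((i + j : Nat) : Int) then pvGet b i' j' else 0)).sum)
      = (List.range rows).map (aterm b cols ((i + j : Nat) : Int)) :=
    List.map_congr_left (fun i' _ => ahit_sum b cols i' (i + j))
  rw [hm1, hm2]
  rw [show ((List.range rows).map (dterm b cols (((i + (cols - 1) - j : Nat) : Int) - ((cols : Int) - 1)))).sum
      = dsum b rows cols (((i + (cols - 1) - j : Nat) : Int) - ((cols : Int) - 1)) from rfl]
  rw [show ((List.range rows).map (aterm b cols ((i + j : Nat) : Int))).sum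
      = asum b rows cols ((i + j : Nat) : Int) from rfl]
  rw [show (((i + (cols - 1) - j : Nat) : Int) - ((cols : Int) - 1)) = ((i : Int) - (j : Int)) from by omega]
  rw [show (((i + j : Nat)) : Int) = ((i : Int) + (j : Int)) from by omega]
  rw [dsum_cell b rows cols i j hi' hj', asum_cell b rows cols i j hi' hj']
  ring
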